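-- pv_equiv track=rewrite | github.com/sebieire/csscade | csscade/optimization/batch_processor.py | optimize_operations
-- ===== SOURCE A (Python) =====
-- from typing import Any, Dict, List, Optional, Tuple
--
-- def optimize_operations(
--
--     operations: List[Tuple[str, Any, Any]]
-- ) -> List[Tuple[str, Any, Any]]:
--     """
--     Optimize operations before processing.
--
--     Args:
--         operations: List of operations
--
--     Returns:
--         Optimized list of operations
--     """
--     # Group similar operations for better cache locality
--     grouped = {}
--     for op in operations:
--         op_type = op[0]
--         if op_type not in grouped:
--             grouped[op_type] = []
--         grouped[op_type].append(op)
--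
--     # Flatten back to list with grouped operations
--     optimized = []
--     for op_type in sorted(grouped.keys()):
--         optimized.extend(grouped[op_type])
--
--     return optimized
-- ===== SOURCE B (Python) =====
-- from typing import Any, List, Tuple
--
--
-- def optimize_operations(
--     operations: List[Tuple[str, Any, Any]]
-- ) -> List[Tuple[str, Any, Any]]:
--     """Stable one-pass sort by operation type; same grouping as the
--     dict-of-buckets version because Python's sort is stable."""
--     return sorted(operations, key=lambda op: op[0])
-- ===== Notes on version B (the rewrite author's own statement) =====
-- stated objective: simpler
-- what changed: Replaced the group-into-a-dict-then-flatten-by-sorted-keys two-phase loop with a single stable sorted() call keyed on the operation type; no dict or buckets are built.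
import Mathlib
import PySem

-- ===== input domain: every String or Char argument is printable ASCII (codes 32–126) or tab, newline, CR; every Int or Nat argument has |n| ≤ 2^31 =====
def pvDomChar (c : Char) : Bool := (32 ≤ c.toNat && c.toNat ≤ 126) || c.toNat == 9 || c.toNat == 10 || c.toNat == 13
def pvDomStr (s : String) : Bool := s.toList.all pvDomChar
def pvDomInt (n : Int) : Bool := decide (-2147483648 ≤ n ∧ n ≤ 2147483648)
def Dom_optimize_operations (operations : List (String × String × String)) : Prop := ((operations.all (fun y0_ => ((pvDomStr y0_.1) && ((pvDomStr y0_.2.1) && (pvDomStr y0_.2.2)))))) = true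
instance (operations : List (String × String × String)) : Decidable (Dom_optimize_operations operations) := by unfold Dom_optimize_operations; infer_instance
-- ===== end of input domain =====

-- B replaces A's group-into-a-dict-then-flatten-by-sorted-keys loops with one stable sort
-- keyed on the operation type (simpler; same return value).

-- ===== PORT A =====
def optimize_operations (operations : List (String × String × String)) : List (String × String × String) :=
  -- grouped = {}; for op in operations: if op[0] not in grouped: grouped[op[0]] = []; grouped[op[0]].append(op)
  let grouped : PySem.Dict String (List (String × String × String)) :=
    operations.foldl (fun d op =>
      let d := if d.contains op.1 then d else d.insert op.1 []
      d.modify op.1 [] (fun l => l ++ [op])) PySem.Dict.empty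
  -- optimized = []; for op_type in sorted(grouped.keys()): optimized.extend(grouped[op_type])
  (PySem.List.sorted grouped.keys (fun k => k) false).foldl
    (fun acc k => acc ++ grouped.getD k []) []

-- ===== PORT B =====
def optimize_operations_alt (operations : List (String × String × String)) : List (String × String × String) :=
  PySem.List.sorted operations (fun op => op.1) false

-- ===== PRECONDITION & SPEC =====
def Spec_optimize_operations (operations : List (String × String × String)) (out : List (String × String × String)) : Prop := out = optimize_operations_alt operations
instance (operations : List (String × String × String)) (out : List (String × String × String)) : Decidable (Spec_optimize_operations operations out) := by unfold Spec_optimize_operations; infer_instance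

-- ===== CLAIM (what is proved, stated in full; the proofs are below) =====
def Claim_equal_optimize_operations : Prop := ∀ (operations : List (String × String × String)), Dom_optimize_operations operations → Spec_optimize_operations operations (optimize_operations operations)

-- ===== LEMMAS AND PROOFS =====

-- Basic stepping facts about PySem.List.insertBy (shapes not provided by the prelude).
theorem insertBy_cons_pos {α : Type} (before : α → α → Bool) (x y : α) (l : List α)
    (h : before x y = true) :
    PySem.List.insertBy before x (y :: l) = x :: y :: l := by
  simp [PySem.List.insertBy, h]

theorem insertBy_cons_neg {α : Type} (before : α → α → Bool) (x y : α) (l : List α)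
    (h : before x y = false) :
    PySem.List.insertBy before x (y :: l) = y :: PySem.List.insertBy before x l := by
  simp [PySem.List.insertBy, h]

theorem insertBy_append_neg {α : Type} (before : α → α → Bool) (x : α) (l1 l2 : List α)
    (h : ∀ y ∈ l1, before x y = false) :
    PySem.List.insertBy before x (l1 ++ l2) = l1 ++ PySem.List.insertBy before x l2 := by
  induction l1 with
  | nil => simp
  | cons y t ih =>
      simp only [List.cons_append]
      rw [insertBy_cons_neg _ _ _ _ (h y (by simp))]
      simp [ih (fun z hz => h z (by simp [hz]))]

theorem insertBy_all_pos {α : Type} (before : α → α → Bool) (x : α) (l : List α)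
    (h : ∀ y ∈ l, before x y = true) :
    PySem.List.insertBy before x l = x :: l := by
  cases l with
  | nil => simp [PySem.List.insertBy]
  | cons y t => exact insertBy_cons_pos _ _ _ _ (h y (by simp))

-- sorted(l ++ [a]) = insert a into sorted(l)  (insertion-sort unfolding)
theorem sorted_append_singleton {α κ : Type} [LT κ] [DecidableLT κ] (l : List α) (a : α) (key : α → κ) :
    PySem.List.sorted (l ++ [a]) key false =
      PySem.List.insertBy (fun p q => decide (key p < key q)) a (PySem.List.sorted l key false) := by
  rw [PySem.List.sorted_eq_foldl_insertBy, PySem.List.sorted_eq_foldl_insertBy, List.foldl_append]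
  rfl

-- Python's dedup (first occurrences) after appending one element.
theorem dedup_append_singleton {α : Type} [BEq α] [LawfulBEq α] (l : List α) (a : α) :
    PySem.List.dedup (l ++ [a]) =
      if a ∈ l then PySem.List.dedup l else PySem.List.dedup l ++ [a] := by
  simp only [PySem.List.dedup_eq_ofList, PySem.Set.ofList_append, PySem.Set.update_cons,
    PySem.Set.update_nil, PySem.Set.add]
  by_cases h : a ∈ l
  · simp [PySem.Set.contains, PySem.Set.mem_ofList, h]
  · simp [PySem.Set.contains, PySem.Set.mem_ofList, h]

-- Inserting one operation into a key-grouped flatten: it lands at the end of its key's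
-- group (existing key) or as a fresh singleton group at its key's sorted position.
theorem insertBy_flatMap (x : String × String × String) :
    ∀ (K : List String) (g : String → List (String × String × String)),
      K.Pairwise (· < ·) →
      (∀ k y, y ∈ g k → y.1 = k) →
      (x.1 ∉ K → g x.1 = []) →
      PySem.List.insertBy (fun a b => decide (a.1 < b.1)) x (K.flatMap g) =
        (if x.1 ∈ K then K else PySem.List.insertBy (fun a b => decide (a < b)) x.1 K).flatMap
          (fun k => g k ++ if x.1 = k then [x] else []) := by
  intro K
  induction K with
  | nil =>
      intro g _ _ hnew
      simp [PySem.List.insertBy, hnew (by simp)]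
  | cons k K' ih =>
      intro g hpw hg hnew
      have hpw' : K'.Pairwise (· < ·) := hpw.of_cons
      have hklt : ∀ k' ∈ K', k < k' := fun k' hk' => (List.pairwise_cons.mp hpw).1 k' hk'
      rcases lt_trichotomy x.1 k with hlt | heq | hgt
      · -- x.1 < k : x goes first, its key is fresh
        have hnotin : x.1 ∉ k :: K' := by
          simp only [List.mem_cons]
          rintro (h | h)
          · exact absurd hlt (h ▸ lt_irrefl _)
          · exact absurd hlt (lt_asymm (hklt _ h))
        have hins : PySem.List.insertBy (fun a b => decide (a < b)) x.1 (k :: K') = x.1 :: k :: K' :=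
          insertBy_cons_pos _ _ _ _ (by simp [hlt])
        rw [if_neg hnotin, hins]
        have hall : ∀ y ∈ (k :: K').flatMap g, (fun a b => decide (a.1 < b.1)) x y = true := by
          intro y hy
          rcases List.mem_flatMap.mp hy with ⟨k', hk', hyk'⟩
          have : y.1 = k' := hg k' y hyk'
          rcases hk' with _ | hk'
          · simp [this, hlt]
          · simp [this, lt_trans hlt (hklt _ (by assumption))]
        rw [insertBy_all_pos _ _ _ hall]
        have hgx : g x.1 = [] := hnew hnotin
        have hgk : ∀ k' ∈ k :: K', (fun k => g k ++ if x.1 = k then [x] else []) k' = g k' := by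
          intro k' hk'
          have : x.1 ≠ k' := by intro h; exact hnotin (h ▸ hk')
          simp [this]
        conv_rhs => rw [List.flatMap_cons]
        rw [List.flatMap_congr hgk]
        simp [hgx]
      · -- x.1 = k : x appends to group k
        have hin : x.1 ∈ k :: K' := by simp [heq]
        rw [if_pos hin]
        have hpass : ∀ y ∈ g k, (fun a b => decide (a.1 < b.1)) x y = false := by
          intro y hy; simp [hg k y hy, heq]
        simp only [List.flatMap_cons]
        rw [insertBy_append_neg _ _ _ _ hpass]
        have hall : ∀ y ∈ K'.flatMap g, (fun a b => decide (a.1 < b.1)) x y = true := by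
          intro y hy
          rcases List.mem_flatMap.mp hy with ⟨k', hk', hyk'⟩
          simp [hg k' y hyk', heq, hklt _ hk']
        rw [insertBy_all_pos _ _ _ hall]
        have hxnot : ∀ k' ∈ K', x.1 ≠ k' := by
          intro k' hk' h; exact absurd (h ▸ heq ▸ hklt _ hk') (lt_irrefl _)
        have : ∀ k' ∈ K', (fun k => g k ++ if x.1 = k then [x] else []) k' = g k' := by
          intro k' hk'; simp [hxnot k' hk']
        rw [List.flatMap_congr this]
        simp [heq]
      · -- k < x.1 : pass group k and recurse
        have hpass : ∀ y ∈ g k, (fun a b => decide (a.1 < b.1)) x y = false := by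
          intro y hy
          simp only [hg k y hy, decide_eq_false_iff_not]
          exact lt_asymm hgt
        simp only [List.flatMap_cons]
        rw [insertBy_append_neg _ _ _ _ hpass]
        have hne : x.1 ≠ k := ne_of_gt hgt
        have hnew' : x.1 ∉ K' → g x.1 = [] := by
          intro h; exact hnew (by simp [hne, h])
        have ihh := ih g hpw' hg hnew'
        rw [ihh]
        by_cases hmem : x.1 ∈ K'
        · rw [if_pos hmem, if_pos (by simp [hmem])]
          simp [hne]
        · rw [if_neg hmem, if_neg (by simp [hne, hmem])]
          rw [insertBy_cons_neg _ _ _ _ (by simp only [decide_eq_false_iff_not]; exact lt_asymm hgt)]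
          simp [hne]

-- Stable sort by key = flatten of the key-groups in sorted key order (the heart of A = B).
theorem sorted_eq_grouped (xs : List (String × String × String)) :
    PySem.List.sorted xs (fun op => op.1) false =
      (PySem.List.sorted (PySem.List.dedup (xs.map (·.1))) (fun k => k) false).flatMap
        (fun k => xs.filter (fun op => op.1 == k)) := by
  induction xs using List.reverseRecOn with
  | nil => simp [PySem.List.sorted, PySem.List.dedup]
  | append_singleton xs x ih =>
      rw [sorted_append_singleton, ih]
      have hK := PySem.List.sorted_ofList_pairwise_lt (xs.map (·.1))
      set K := PySem.List.sorted (PySem.List.dedup (xs.map (·.1))) (fun k => k) false with hKdef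
      have hpw : K.Pairwise (· < ·) := by
        simpa [hKdef, PySem.List.dedup_eq_ofList] using hK
      have hmemK : ∀ a, a ∈ K ↔ a ∈ xs.map (·.1) := by
        intro a
        simp [hKdef, PySem.List.mem_sorted, PySem.List.dedup_eq_ofList, PySem.Set.mem_ofList]
      have hg : ∀ k y, y ∈ xs.filter (fun op => op.1 == k) → y.1 = k := by
        intro k y hy
        have := List.of_mem_filter hy
        simpa using this
      have hnew : x.1 ∉ K → xs.filter (fun op => op.1 == x.1) = [] := by
        intro h
        have hx : x.1 ∉ xs.map (·.1) := fun hm => h ((hmemK _).mpr hm)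
        rw [List.filter_eq_nil_iff]
        intro y hy
        simp only [beq_iff_eq]
        intro hee
        exact hx (hee ▸ List.mem_map.mpr ⟨y, hy, rfl⟩)
      rw [insertBy_flatMap x K _ hpw hg hnew]
      -- identify the new key list and the new groups
      have hkeys : (if x.1 ∈ K then K else PySem.List.insertBy (fun a b => decide (a < b)) x.1 K) =
          PySem.List.sorted (PySem.List.dedup ((xs ++ [x]).map (·.1))) (fun k => k) false := by
        rw [List.map_append, List.map_cons, List.map_nil, dedup_append_singleton]
        by_cases hmem : x.1 ∈ xs.map (·.1)
        · rw [if_pos ((hmemK _).mpr hmem), if_pos hmem]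
        · rw [if_neg (fun h => hmem ((hmemK _).mp h)), if_neg hmem, sorted_append_singleton]
      rw [hkeys]
      apply List.flatMap_congr
      intro k _
      rw [List.filter_append]
      by_cases hk : x.1 = k
      · simp [hk]
      · simp [hk]

-- The guarded dict step of A's loop is exactly 'd[k] = d.get(k, []) + [op]'.
theorem step_eq (d : PySem.Dict String (List (String × String × String)))
    (op : String × String × String) :
    (let d' := if d.contains op.1 then d else d.insert op.1 []
     d'.modify op.1 [] (fun l => l ++ [op])) = d.modify op.1 [] (fun l => l ++ [op]) := by
  by_cases h : d.contains op.1 = true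
  · simp [h]
  · have hfalse : d.contains op.1 = false := by simpa using h
    simp only [hfalse, Bool.false_eq_true, ite_false]
    simp [PySem.Dict.modify, PySem.Dict.insert_insert_self,
      PySem.Dict.getD_insert_self, PySem.Dict.getD_of_not_contains d [] hfalse]

-- A's grouping dict: lookup of a key is the filter of the input by that key.
theorem grouped_getD (xs : List (String × String × String)) (c : String) :
    (xs.foldl (fun d op => d.modify op.1 [] (fun l => l ++ [op]))
      (PySem.Dict.empty : PySem.Dict String (List (String × String × String)))).getD c [] =
      xs.filter (fun op => op.1 == c) := by
  have h : xs.foldl (fun d op => d.modify op.1 [] (fun l => l ++ [op]))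
      (PySem.Dict.empty : PySem.Dict String (List (String × String × String)))
      = (xs.map (fun op => (op.1, op))).foldl (fun d p => d.modify p.1 [] (fun l => l ++ [p.2]))
        PySem.Dict.empty := by
    rw [List.foldl_map]
  rw [h, PySem.Dict.getD_foldl_modify_append]
  simp [PySem.Dict.getD_empty, List.filter_map, Function.comp_def, List.map_map]

-- A's grouping dict: its key list is the input's key list deduplicated in first-seen order.
theorem grouped_keys (xs : List (String × String × String)) :
    (xs.foldl (fun d op => d.modify op.1 [] (fun l => l ++ [op]))
      (PySem.Dict.empty : PySem.Dict String (List (String × String × String)))).keys =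
      PySem.List.dedup (xs.map (·.1)) := by
  rw [PySem.Dict.keys_foldl_modify_key]
  simp [PySem.Dict.keys_empty, PySem.Set.update_nil_left, PySem.List.dedup_eq_ofList]

-- ===== VERDICT (by name: the statement is the Claim_ definition above) =====
theorem optimize_operations_spec : Claim_equal_optimize_operations := by
  intro xs _
  unfold Spec_optimize_operations optimize_operations optimize_operations_alt
  have hstep : (fun (d : PySem.Dict String (List (String × String × String))) op =>
      (let d' := if d.contains op.1 then d else d.insert op.1 []
       d'.modify op.1 [] (fun l => l ++ [op]))) =
      fun d op => d.modify op.1 [] (fun l => l ++ [op]) := by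
    funext d op; exact step_eq d op
  simp only [hstep]
  rw [PySem.List.foldl_append_eq_flatMap, List.nil_append, grouped_keys, sorted_eq_grouped]
  apply List.flatMap_congr
  intro k _
  rw [grouped_getD]
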